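-- pv_equiv track=rewrite | github.com/mcarla/ufo | ufo/methods.py | kick
-- ===== SOURCE A (Python) =====
-- LINEAR           = 1 << 0
--
-- ACHROMATIC       = 1 << 6
--
-- def kick(flags, knl, ksl):
--     fragment = ''
--
--     if knl:
--         n = len(knl) #Avoid non-linear terms when LINEAR
--         max_order = min(n, 2) if (flags & LINEAR) else n
--
--         dpx = f'{knl[max_order - 1]} {"" if flags & ACHROMATIC else "* oodppo"}'
--         dpy =  '0.'
--
--         for order in range(max_order - 1, 0, -1):
--             aux = f'({dpx} * x - ({dpy} * y)) / {order}'
--             dpy = f'({dpx} * y + ({dpy} * x)) / {order}'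
--             dpx = f'({knl[order - 1]} {"" if flags & ACHROMATIC else "* oodppo"} + {aux})'
--
--         fragment = f'px -= {dpx};\npy += {dpy};\n\n'
--
--     if ksl:
--         n = len(ksl) #Avoid non-linear terms when LINEAR
--         max_order = min(n, 2) if (flags & LINEAR) else n
--
--         dpy = f'{ksl[max_order - 1]} {"" if flags & ACHROMATIC else "* oodppo"}'
--         dpx =  '0.'
--
--         for order in range(max_order - 1, 0, -1):
--             aux = f'({dpx} * y + ({dpy} * x)) / {order}'
--             dpx = f'({dpx} * x - ({dpy} * y)) / {order}'
--             dpy = f'({ksl[order - 1]} {"" if flags & ACHROMATIC else "* oodppo"} + {aux})'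
--
--         fragment += f'px -= {dpx};\npy += {dpy};\n\n'
--
--     return fragment
-- ===== SOURCE B (Python) =====
-- LINEAR           = 1 << 0
--
-- ACHROMATIC       = 1 << 6
--
-- def _build(step, seed, m, order):
--     # Recursively build the (dpx, dpy) pair: seed at the top order m,
--     # then apply the per-order step on the way back down to `order`.
--     if order < m:
--         return step(order, _build(step, seed, m, order + 1))
--     return seed
--
-- def kick(flags, knl, ksl):
--     suffix = '' if flags & ACHROMATIC else '* oodppo'
--
--     def top(coeffs):
--         return min(len(coeffs), 2) if flags & LINEAR else len(coeffs)
--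
--     def step_n(order, st):
--         dpx, dpy = st
--         aux = f'({dpx} * x - ({dpy} * y)) / {order}'
--         return (f'({knl[order - 1]} {suffix} + {aux})',
--                 f'({dpx} * y + ({dpy} * x)) / {order}')
--
--     def step_s(order, st):
--         dpx, dpy = st
--         aux = f'({dpx} * y + ({dpy} * x)) / {order}'
--         return (f'({dpx} * x - ({dpy} * y)) / {order}',
--                 f'({ksl[order - 1]} {suffix} + {aux})')
--
--     part1 = ''
--     if knl:
--         m = top(knl)
--         dpx, dpy = _build(step_n, (f'{knl[m - 1]} {suffix}', '0.'), m, 1)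
--         part1 = f'px -= {dpx};\npy += {dpy};\n\n'
--
--     part2 = ''
--     if ksl:
--         m = top(ksl)
--         dpx, dpy = _build(step_s, ('0.', f'{ksl[m - 1]} {suffix}'), m, 1)
--         part2 = f'px -= {dpx};\npy += {dpy};\n\n'
--
--     return part1 + part2
-- ===== Notes on version B (the rewrite author's own statement) =====
-- stated objective: alternative
-- what changed: Replaces the two imperative accumulator loops over a descending range with a single generic recursive builder (_build) that recurses up the order index and forms the string pair on the way back, instantiated with a per-axis step function for knl and ksl.
import Mathlib
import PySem

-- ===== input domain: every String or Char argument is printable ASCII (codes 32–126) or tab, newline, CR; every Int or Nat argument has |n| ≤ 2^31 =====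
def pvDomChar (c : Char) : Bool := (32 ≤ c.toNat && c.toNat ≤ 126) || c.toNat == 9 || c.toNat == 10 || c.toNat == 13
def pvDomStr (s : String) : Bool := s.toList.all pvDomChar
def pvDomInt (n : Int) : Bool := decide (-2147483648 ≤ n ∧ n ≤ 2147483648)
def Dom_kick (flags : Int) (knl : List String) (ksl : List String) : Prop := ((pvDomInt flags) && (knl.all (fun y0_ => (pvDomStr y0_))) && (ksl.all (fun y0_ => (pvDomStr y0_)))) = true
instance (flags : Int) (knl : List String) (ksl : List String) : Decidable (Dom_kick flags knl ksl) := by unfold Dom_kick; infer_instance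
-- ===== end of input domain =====

-- B replaces A's two descending accumulator loops by one generic recursive builder instantiated per axis; same output, same cost (objective: alternative).

-- ===== PORT A =====
def kick (flags : Int) (knl : List String) (ksl : List String) : String :=
  let fragment := ""
  let fragment :=
    if knl ≠ [] then
      let n : Int := knl.length
      let max_order : Int := if PySem.Int.band flags 1 ≠ 0 then min n 2 else n
      let dpx := PySem.List.pyGetD knl (max_order - 1) "" ++ " " ++
        (if PySem.Int.band flags 64 ≠ 0 then "" else "* oodppo")
      let dpy := "0."
      let st := (PySem.List.pyRange (max_order - 1) 0 (-1)).foldl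
        (fun (st : String × String) order =>
          let aux := "(" ++ st.1 ++ " * x - (" ++ st.2 ++ " * y)) / " ++ PySem.Int.toStr order
          let dpy := "(" ++ st.1 ++ " * y + (" ++ st.2 ++ " * x)) / " ++ PySem.Int.toStr order
          let dpx := "(" ++ PySem.List.pyGetD knl (order - 1) "" ++ " " ++
            (if PySem.Int.band flags 64 ≠ 0 then "" else "* oodppo") ++ " + " ++ aux ++ ")"
          (dpx, dpy)) (dpx, dpy)
      "px -= " ++ st.1 ++ ";\npy += " ++ st.2 ++ ";\n\n"
    else fragment
  if ksl ≠ [] then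
    let n : Int := ksl.length
    let max_order : Int := if PySem.Int.band flags 1 ≠ 0 then min n 2 else n
    let dpy := PySem.List.pyGetD ksl (max_order - 1) "" ++ " " ++
      (if PySem.Int.band flags 64 ≠ 0 then "" else "* oodppo")
    let dpx := "0."
    let st := (PySem.List.pyRange (max_order - 1) 0 (-1)).foldl
      (fun (st : String × String) order =>
        let aux := "(" ++ st.1 ++ " * y + (" ++ st.2 ++ " * x)) / " ++ PySem.Int.toStr order
        let dpx := "(" ++ st.1 ++ " * x - (" ++ st.2 ++ " * y)) / " ++ PySem.Int.toStr order
        let dpy := "(" ++ PySem.List.pyGetD ksl (order - 1) "" ++ " " ++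
          (if PySem.Int.band flags 64 ≠ 0 then "" else "* oodppo") ++ " + " ++ aux ++ ")"
        (dpx, dpy)) (dpx, dpy)
    fragment ++ ("px -= " ++ st.1 ++ ";\npy += " ++ st.2 ++ ";\n\n")
  else fragment

-- ===== PORT B =====
-- generic recursive builder (= _build in Source B): recurse up the order index, apply step on the way back
def kickBuild (step : Nat → String × String → String × String) (seed : String × String)
    (m : Nat) (order : Nat) : String × String :=
  if h : order < m then step order (kickBuild step seed m (order + 1))
  else seed
termination_by m - order

def kick_alt (flags : Int) (knl : List String) (ksl : List String) : String :=
  let suffix := if PySem.Int.band flags 64 ≠ 0 then "" else "* oodppo"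
  let top := fun (coeffs : List String) =>
    if PySem.Int.band flags 1 ≠ 0 then min coeffs.length 2 else coeffs.length
  let step_n := fun (order : Nat) (st : String × String) =>
    let aux := "(" ++ st.1 ++ " * x - (" ++ st.2 ++ " * y)) / " ++ PySem.Int.toStr order
    ("(" ++ knl.getD (order - 1) "" ++ " " ++ suffix ++ " + " ++ aux ++ ")",
     "(" ++ st.1 ++ " * y + (" ++ st.2 ++ " * x)) / " ++ PySem.Int.toStr order)
  let step_s := fun (order : Nat) (st : String × String) =>
    let aux := "(" ++ st.1 ++ " * y + (" ++ st.2 ++ " * x)) / " ++ PySem.Int.toStr order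
    ("(" ++ st.1 ++ " * x - (" ++ st.2 ++ " * y)) / " ++ PySem.Int.toStr order,
     "(" ++ ksl.getD (order - 1) "" ++ " " ++ suffix ++ " + " ++ aux ++ ")")
  let part1 :=
    if knl ≠ [] then
      let m := top knl
      let p := kickBuild step_n (knl.getD (m - 1) "" ++ " " ++ suffix, "0.") m 1
      "px -= " ++ p.1 ++ ";\npy += " ++ p.2 ++ ";\n\n"
    else ""
  let part2 :=
    if ksl ≠ [] then
      let m := top ksl
      let p := kickBuild step_s ("0.", ksl.getD (m - 1) "" ++ " " ++ suffix) m 1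
      "px -= " ++ p.1 ++ ";\npy += " ++ p.2 ++ ";\n\n"
    else ""
  part1 ++ part2

-- ===== PRECONDITION & SPEC =====
def Spec_kick (flags : Int) (knl : List String) (ksl : List String) (out : String) : Prop := out = kick_alt flags knl ksl
instance (flags : Int) (knl : List String) (ksl : List String) (out : String) : Decidable (Spec_kick flags knl ksl out) := by unfold Spec_kick; infer_instance

-- ===== CLAIM (what is proved, stated in full; the proofs are below) =====
def Claim_equal_kick : Prop := ∀ (flags : Int) (knl : List String) (ksl : List String), Dom_kick flags knl ksl → Spec_kick flags knl ksl (kick flags knl ksl)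

-- ===== LEMMAS AND PROOFS =====

-- A's foldl over range(m-1, j-1, -1) equals B's recursive builder started at order j,
-- whenever the Int-indexed step f and the Nat-indexed step g agree on orders in [1, m).
theorem foldl_pyRange_eq_kickBuild (f : String × String → Int → String × String)
    (g : Nat → String × String → String × String) (seed : String × String)
    (m j : Nat) (hj : 1 ≤ j)
    (hfg : ∀ (k : Nat) (st : String × String), 1 ≤ k → k < m → f st (k : Int) = g k st) :
    (PySem.List.pyRange ((m : Int) - 1) ((j : Int) - 1) (-1)).foldl f seed
      = kickBuild g seed m j := by
  induction hmj : m - j generalizing j with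
  | zero =>
    have hnl : ((m : Int) - 1) ≤ ((j : Int) - 1) := by omega
    rw [PySem.List.pyRange_neg_one_eq_nil hnl, List.foldl_nil, kickBuild,
      dif_neg (by omega : ¬ j < m)]
  | succ k ih =>
    have hjm : j < m := by omega
    rw [PySem.List.pyRange_neg_one_eq_reverse]
    have h1 : ((j : Int) - 1) + 1 = (j : Int) := by ring
    have h2 : ((m : Int) - 1) + 1 = (m : Int) := by ring
    rw [h1, h2, List.foldl_reverse,
      PySem.List.pyRange_one_cons (by exact_mod_cast hjm), List.foldr_cons]
    have htail : (PySem.List.pyRange ((j : Int) + 1) (m : Int) 1).foldr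
        (fun x y => f y x) seed
        = kickBuild g seed m (j + 1) := by
      have hrec := ih (j + 1) (by omega) (by omega)
      rw [PySem.List.pyRange_neg_one_eq_reverse] at hrec
      have h1' : ((j + 1 : Nat) : Int) - 1 + 1 = (j : Int) + 1 := by push_cast; ring
      rw [h1', h2, List.foldl_reverse] at hrec
      exact hrec
    rw [htail, hfg j _ hj hjm]
    conv_rhs => rw [kickBuild]
    rw [dif_pos hjm]

-- per-axis bridge: A's foldl with Int bounds/seed equals B's builder with the Nat counterparts
theorem kick_side (f : String × String → Int → String × String)
    (g : Nat → String × String → String × String)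
    (seedI seedN : String × String) (hseed : seedI = seedN)
    (mI : Int) (mN : Nat) (hm : mI = (mN : Int)) (_hm1 : 1 ≤ mN)
    (hfg : ∀ (k : Nat) (st : String × String), 1 ≤ k → k < mN → f st (k : Int) = g k st) :
    (PySem.List.pyRange (mI - 1) 0 (-1)).foldl f seedI = kickBuild g seedN mN 1 := by
  subst hm hseed
  have h0 : (0 : Int) = ((1 : Nat) : Int) - 1 := by norm_num
  rw [h0]
  exact foldl_pyRange_eq_kickBuild f g seedI mN 1 le_rfl hfg

theorem pyGetD_pred_natCast (xs : List String) (k : Nat) (hk : 1 ≤ k) :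
    PySem.List.pyGetD xs ((k : Int) - 1) "" = xs.getD (k - 1) "" := by
  have h : ((k : Int) - 1) = ((k - 1 : Nat) : Int) := by omega
  rw [h, PySem.List.pyGetD_natCast]

theorem max_order_cast (flags : Int) (coeffs : List String) :
    (if PySem.Int.band flags 1 ≠ 0 then min (coeffs.length : Int) 2 else (coeffs.length : Int))
      = ((if PySem.Int.band flags 1 ≠ 0 then min coeffs.length 2 else coeffs.length : Nat) : Int) := by
  split <;> push_cast <;> ring

theorem max_order_pos (flags : Int) (coeffs : List String) (hne : coeffs ≠ []) :
    1 ≤ (if PySem.Int.band flags 1 ≠ 0 then min coeffs.length 2 else coeffs.length) := by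
  have : 1 ≤ coeffs.length := List.length_pos_iff.mpr hne
  split <;> omega

-- ===== VERDICT (by name: the statement is the Claim_ definition above) =====
theorem kick_spec : Claim_equal_kick := by
  unfold Claim_equal_kick
  intro flags knl ksl _
  unfold Spec_kick kick kick_alt
  by_cases hk : knl = [] <;> by_cases hs : ksl = []
  · simp only [if_neg (not_not_intro hk), if_neg (not_not_intro hs)]
    rfl
  · simp only [if_neg (not_not_intro hk), if_pos hs]
    set sfx : String := (if PySem.Int.band flags 64 ≠ 0 then "" else "* oodppo") with hsfx
    have h_ksl :
      (PySem.List.pyRange ((if PySem.Int.band flags 1 ≠ 0 then min ((ksl.length : Int)) 2 else ((ksl.length : Int))) - 1) 0 (-1)).foldl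
        (fun (st : String × String) (order : Int) =>
          ("(" ++ st.1 ++ " * x - (" ++ st.2 ++ " * y)) / " ++ PySem.Int.toStr order,
           "(" ++ PySem.List.pyGetD ksl (order - 1) "" ++ " " ++ sfx ++ " + " ++ ("(" ++ st.1 ++ " * y + (" ++ st.2 ++ " * x)) / " ++ PySem.Int.toStr order) ++ ")"))
        ("0.", PySem.List.pyGetD ksl ((if PySem.Int.band flags 1 ≠ 0 then min ((ksl.length : Int)) 2 else ((ksl.length : Int))) - 1) "" ++ " " ++ sfx)
      = kickBuild
        (fun (order : Nat) (st : String × String) =>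
          ("(" ++ st.1 ++ " * x - (" ++ st.2 ++ " * y)) / " ++ PySem.Int.toStr order,
           "(" ++ ksl.getD (order - 1) "" ++ " " ++ sfx ++ " + " ++ ("(" ++ st.1 ++ " * y + (" ++ st.2 ++ " * x)) / " ++ PySem.Int.toStr order) ++ ")"))
        ("0.", ksl.getD ((if PySem.Int.band flags 1 ≠ 0 then min ksl.length 2 else ksl.length) - 1) "" ++ " " ++ sfx)
        (if PySem.Int.band flags 1 ≠ 0 then min ksl.length 2 else ksl.length) 1 := by
      refine kick_side _ _ _ _ ?_ _ _ (max_order_cast flags ksl) (max_order_pos flags ksl hs) ?_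
      · rw [max_order_cast flags ksl, pyGetD_pred_natCast ksl _ (max_order_pos flags ksl hs)]
      · intro k st hk1 _
        rw [pyGetD_pred_natCast ksl k hk1]
    rw [h_ksl]
  · simp only [if_pos hk, if_neg (not_not_intro hs)]
    set sfx : String := (if PySem.Int.band flags 64 ≠ 0 then "" else "* oodppo") with hsfx
    have h_knl :
      (PySem.List.pyRange ((if PySem.Int.band flags 1 ≠ 0 then min ((knl.length : Int)) 2 else ((knl.length : Int))) - 1) 0 (-1)).foldl
        (fun (st : String × String) (order : Int) =>
          ("(" ++ PySem.List.pyGetD knl (order - 1) "" ++ " " ++ sfx ++ " + " ++ ("(" ++ st.1 ++ " * x - (" ++ st.2 ++ " * y)) / " ++ PySem.Int.toStr order) ++ ")",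
           "(" ++ st.1 ++ " * y + (" ++ st.2 ++ " * x)) / " ++ PySem.Int.toStr order))
        (PySem.List.pyGetD knl ((if PySem.Int.band flags 1 ≠ 0 then min ((knl.length : Int)) 2 else ((knl.length : Int))) - 1) "" ++ " " ++ sfx, "0.")
      = kickBuild
        (fun (order : Nat) (st : String × String) =>
          ("(" ++ knl.getD (order - 1) "" ++ " " ++ sfx ++ " + " ++ ("(" ++ st.1 ++ " * x - (" ++ st.2 ++ " * y)) / " ++ PySem.Int.toStr order) ++ ")",
           "(" ++ st.1 ++ " * y + (" ++ st.2 ++ " * x)) / " ++ PySem.Int.toStr order))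
        (knl.getD ((if PySem.Int.band flags 1 ≠ 0 then min knl.length 2 else knl.length) - 1) "" ++ " " ++ sfx, "0.")
        (if PySem.Int.band flags 1 ≠ 0 then min knl.length 2 else knl.length) 1 := by
      refine kick_side _ _ _ _ ?_ _ _ (max_order_cast flags knl) (max_order_pos flags knl hk) ?_
      · rw [max_order_cast flags knl, pyGetD_pred_natCast knl _ (max_order_pos flags knl hk)]
      · intro k st hk1 _
        rw [pyGetD_pred_natCast knl k hk1]
    rw [h_knl]
    exact String.append_empty.symm
  · simp only [if_pos hk, if_pos hs]
    set sfx : String := (if PySem.Int.band flags 64 ≠ 0 then "" else "* oodppo") with hsfx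
    have h_knl :
      (PySem.List.pyRange ((if PySem.Int.band flags 1 ≠ 0 then min ((knl.length : Int)) 2 else ((knl.length : Int))) - 1) 0 (-1)).foldl
        (fun (st : String × String) (order : Int) =>
          ("(" ++ PySem.List.pyGetD knl (order - 1) "" ++ " " ++ sfx ++ " + " ++ ("(" ++ st.1 ++ " * x - (" ++ st.2 ++ " * y)) / " ++ PySem.Int.toStr order) ++ ")",
           "(" ++ st.1 ++ " * y + (" ++ st.2 ++ " * x)) / " ++ PySem.Int.toStr order))
        (PySem.List.pyGetD knl ((if PySem.Int.band flags 1 ≠ 0 then min ((knl.length : Int)) 2 else ((knl.length : Int))) - 1) "" ++ " " ++ sfx, "0.")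
      = kickBuild
        (fun (order : Nat) (st : String × String) =>
          ("(" ++ knl.getD (order - 1) "" ++ " " ++ sfx ++ " + " ++ ("(" ++ st.1 ++ " * x - (" ++ st.2 ++ " * y)) / " ++ PySem.Int.toStr order) ++ ")",
           "(" ++ st.1 ++ " * y + (" ++ st.2 ++ " * x)) / " ++ PySem.Int.toStr order))
        (knl.getD ((if PySem.Int.band flags 1 ≠ 0 then min knl.length 2 else knl.length) - 1) "" ++ " " ++ sfx, "0.")
        (if PySem.Int.band flags 1 ≠ 0 then min knl.length 2 else knl.length) 1 := by
      refine kick_side _ _ _ _ ?_ _ _ (max_order_cast flags knl) (max_order_pos flags knl hk) ?_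
      · rw [max_order_cast flags knl, pyGetD_pred_natCast knl _ (max_order_pos flags knl hk)]
      · intro k st hk1 _
        rw [pyGetD_pred_natCast knl k hk1]
    have h_ksl :
      (PySem.List.pyRange ((if PySem.Int.band flags 1 ≠ 0 then min ((ksl.length : Int)) 2 else ((ksl.length : Int))) - 1) 0 (-1)).foldl
        (fun (st : String × String) (order : Int) =>
          ("(" ++ st.1 ++ " * x - (" ++ st.2 ++ " * y)) / " ++ PySem.Int.toStr order,
           "(" ++ PySem.List.pyGetD ksl (order - 1) "" ++ " " ++ sfx ++ " + " ++ ("(" ++ st.1 ++ " * y + (" ++ st.2 ++ " * x)) / " ++ PySem.Int.toStr order) ++ ")"))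
        ("0.", PySem.List.pyGetD ksl ((if PySem.Int.band flags 1 ≠ 0 then min ((ksl.length : Int)) 2 else ((ksl.length : Int))) - 1) "" ++ " " ++ sfx)
      = kickBuild
        (fun (order : Nat) (st : String × String) =>
          ("(" ++ st.1 ++ " * x - (" ++ st.2 ++ " * y)) / " ++ PySem.Int.toStr order,
           "(" ++ ksl.getD (order - 1) "" ++ " " ++ sfx ++ " + " ++ ("(" ++ st.1 ++ " * y + (" ++ st.2 ++ " * x)) / " ++ PySem.Int.toStr order) ++ ")"))
        ("0.", ksl.getD ((if PySem.Int.band flags 1 ≠ 0 then min ksl.length 2 else ksl.length) - 1) "" ++ " " ++ sfx)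
        (if PySem.Int.band flags 1 ≠ 0 then min ksl.length 2 else ksl.length) 1 := by
      refine kick_side _ _ _ _ ?_ _ _ (max_order_cast flags ksl) (max_order_pos flags ksl hs) ?_
      · rw [max_order_cast flags ksl, pyGetD_pred_natCast ksl _ (max_order_pos flags ksl hs)]
      · intro k st hk1 _
        rw [pyGetD_pred_natCast ksl k hk1]
    rw [h_knl, h_ksl]
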